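-- pv_equiv track=rewrite | github.com/blackgeorge97/My-training | tetris/tetrismodel.py | move_tetrimino
-- ===== SOURCE A (Python) =====
-- MOVES = {'up' : [0, -1], 'down' : [0, 1], 'right' : [1, 0], 'left' : [-1, 0]}
--
-- def create_board(HOR_BOXES, VER_BOXES):
--     board = [[0] * HOR_BOXES for _ in range(VER_BOXES)]
--     return board
--
-- def move_tetrimino(board, move_dir, HOR_BOXES, VER_BOXES, place):
--     if move_dir == 'none':
--         return board ,place
--     new_board = create_board(HOR_BOXES, VER_BOXES)
--     new_place = []
--     for box in place:
--         x = box[1] + MOVES[move_dir][0]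
--         y = box[0] + MOVES[move_dir][1]
--         if x not in range(HOR_BOXES) or y not in range(VER_BOXES):
--             new_board.clear()
--             new_place.clear()
--             new_board = board
--             new_place = place
--             break
--         new_place.append([y,x])
--         new_board[y][x] = 1
--     return new_board, new_place
-- ===== SOURCE B (Python) =====
-- MOVES = {'up': [0, -1], 'down': [0, 1], 'right': [1, 0], 'left': [-1, 0]}
--
-- def move_tetrimino(board, move_dir, HOR_BOXES, VER_BOXES, place):
--     if move_dir == 'none':
--         return board, place
--     dx, dy = MOVES[move_dir]
--     new_place = [[b[0] + dy, b[1] + dx] for b in place]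
--     if new_place:
--         xs = [p[1] for p in new_place]
--         ys = [p[0] for p in new_place]
--         if not (0 <= min(xs) and max(xs) < HOR_BOXES and 0 <= min(ys) and max(ys) < VER_BOXES):
--             return board, place
--     cells = {(y, x) for y, x in new_place}
--     new_board = [[1 if (y, x) in cells else 0 for x in range(HOR_BOXES)]
--                  for y in range(VER_BOXES)]
--     return new_board, new_place
-- ===== Notes on version B (the rewrite author's own statement) =====
-- stated objective: alternative
-- what changed: A mutates a freshly allocated grid cell-by-cell inside one fused validate-and-build loop with an early break; B validates all shifted positions at once via min/max extrema of the x and y coordinate lists and then builds the board without mutation as a nested comprehension testing membership of each (y,x) cell in a hash set of targets.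
-- outside the precondition, e.g. on move_tetrimino([[0]], 'up', 1, 1, [[0, 0], [5]]): A returns ([[0]], [[0, 0], [5]]), B raises IndexError
import Mathlib
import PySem

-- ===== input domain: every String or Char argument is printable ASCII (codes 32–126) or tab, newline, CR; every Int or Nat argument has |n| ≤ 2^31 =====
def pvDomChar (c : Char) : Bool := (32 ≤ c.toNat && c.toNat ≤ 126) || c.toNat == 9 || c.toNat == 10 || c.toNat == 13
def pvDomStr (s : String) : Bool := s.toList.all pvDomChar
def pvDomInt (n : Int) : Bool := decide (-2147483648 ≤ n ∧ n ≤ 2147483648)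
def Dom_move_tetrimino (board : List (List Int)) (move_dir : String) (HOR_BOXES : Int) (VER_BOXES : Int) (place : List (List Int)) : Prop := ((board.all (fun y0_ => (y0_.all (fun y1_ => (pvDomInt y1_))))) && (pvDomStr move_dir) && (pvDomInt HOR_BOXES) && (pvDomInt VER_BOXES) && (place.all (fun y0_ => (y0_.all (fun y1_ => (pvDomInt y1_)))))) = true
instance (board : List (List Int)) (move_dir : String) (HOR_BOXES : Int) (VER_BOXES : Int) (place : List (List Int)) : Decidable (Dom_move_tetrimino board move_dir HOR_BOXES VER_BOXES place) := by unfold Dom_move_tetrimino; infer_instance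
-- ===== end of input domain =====

-- B replaces A's fused mutate-and-validate loop by extrema-based validation (min/max of the x and y
-- coordinate lists) and a mutation-free board rebuilt as a nested comprehension over a set of
-- target cells; return values proved equal on Pre_.
-- ===== PORT A =====
def pvMOVES : PySem.Dict String (List Int) :=
  PySem.Dict.ofList [("up", [0, -1]), ("down", [0, 1]), ("right", [1, 0]), ("left", [-1, 0])]

def pvCreateBoard (HOR_BOXES VER_BOXES : Int) : List (List Int) :=
  (List.range VER_BOXES.toNat).map (fun _ => List.replicate HOR_BOXES.toNat 0)

def pvSetCell (nb : List (List Int)) (y x : Int) : List (List Int) :=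
  nb.modify y.toNat (fun row => row.set x.toNat 1)

-- A's for-loop with break: structural recursion over `place`, carrying new_board / new_place
def pvLoopA (board place0 : List (List Int)) (move_dir : String) (HOR_BOXES VER_BOXES : Int) :
    List (List Int) → List (List Int) → List (List Int) → List (List Int) × List (List Int)
  | [], nb, np => (nb, np)
  | box :: rest, nb, np =>
    let x := (PySem.List.pyGet? box 1).getD 0 + (PySem.List.pyGet? (PySem.Dict.getD pvMOVES move_dir []) 0).getD 0
    let y := (PySem.List.pyGet? box 0).getD 0 + (PySem.List.pyGet? (PySem.Dict.getD pvMOVES move_dir []) 1).getD 0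
    if ¬(0 ≤ x ∧ x < HOR_BOXES) ∨ ¬(0 ≤ y ∧ y < VER_BOXES) then (board, place0)
    else pvLoopA board place0 move_dir HOR_BOXES VER_BOXES rest (pvSetCell nb y x) (np ++ [[y, x]])

def move_tetrimino (board : List (List Int)) (move_dir : String) (HOR_BOXES : Int) (VER_BOXES : Int) (place : List (List Int)) : List (List Int) × List (List Int) :=
  if move_dir == "none" then (board, place)
  else pvLoopA board place move_dir HOR_BOXES VER_BOXES place (pvCreateBoard HOR_BOXES VER_BOXES) []

-- ===== PORT B =====
def move_tetrimino_alt (board : List (List Int)) (move_dir : String) (HOR_BOXES : Int) (VER_BOXES : Int) (place : List (List Int)) : List (List Int) × List (List Int) :=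
  if move_dir == "none" then (board, place)
  else
    -- dx, dy = MOVES[move_dir]
    let dxdy := PySem.Dict.getD pvMOVES move_dir []
    let dx := (PySem.List.pyGet? dxdy 0).getD 0
    let dy := (PySem.List.pyGet? dxdy 1).getD 0
    -- new_place = [[b[0] + dy, b[1] + dx] for b in place]
    let new_place := place.map (fun b => [(PySem.List.pyGet? b 0).getD 0 + dy, (PySem.List.pyGet? b 1).getD 0 + dx])
    -- xs = [p[1] for p in new_place]; ys = [p[0] for p in new_place]
    let xs := new_place.map (fun p => (PySem.List.pyGet? p 1).getD 0)
    let ys := new_place.map (fun p => (PySem.List.pyGet? p 0).getD 0)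
    -- if new_place and not (0 <= min(xs) and max(xs) < HOR_BOXES and 0 <= min(ys) and max(ys) < VER_BOXES): return board, place
    if new_place ≠ [] ∧
       ¬(0 ≤ (PySem.List.min? xs (fun v => v)).getD 0 ∧ (PySem.List.max? xs (fun v => v)).getD 0 < HOR_BOXES ∧
         0 ≤ (PySem.List.min? ys (fun v => v)).getD 0 ∧ (PySem.List.max? ys (fun v => v)).getD 0 < VER_BOXES)
    then (board, place)
    else
      -- cells = {(y, x) for y, x in new_place}
      let cells : PySem.Set (Int × Int) :=
        PySem.Set.ofList (new_place.map (fun p => ((PySem.List.pyGet? p 0).getD 0, (PySem.List.pyGet? p 1).getD 0)))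
      -- new_board = [[1 if (y, x) in cells else 0 for x in range(HOR_BOXES)] for y in range(VER_BOXES)]
      ((PySem.List.pyRange 0 VER_BOXES 1).map (fun y =>
         (PySem.List.pyRange 0 HOR_BOXES 1).map (fun x => if (y, x) ∈ cells then (1 : Int) else 0)),
       new_place)

-- ===== PRECONDITION & SPEC =====
-- Pre_ excludes inputs where Python raises (KeyError on an unknown move_dir, IndexError on a box
-- shorter than 2), and therefore also inputs where an early out-of-bounds box makes A break and
-- return before reaching a malformed later box (A returns there, B's mapping pass raises).
def Pre_move_tetrimino (board : List (List Int)) (move_dir : String) (HOR_BOXES : Int) (VER_BOXES : Int) (place : List (List Int)) : Prop :=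
  move_dir = "none" ∨ (move_dir ∈ (["up", "down", "right", "left"] : List String) ∧ ∀ box ∈ place, 2 ≤ box.length)
instance (board : List (List Int)) (move_dir : String) (HOR_BOXES : Int) (VER_BOXES : Int) (place : List (List Int)) : Decidable (Pre_move_tetrimino board move_dir HOR_BOXES VER_BOXES place) := by unfold Pre_move_tetrimino; infer_instance
def pvWitness_move_tetrimino : List (List Int) × String × Int × Int × List (List Int) := ([[0, 0], [0, 0]], "up", 2, 2, [[1, 1]])

def Spec_move_tetrimino (board : List (List Int)) (move_dir : String) (HOR_BOXES : Int) (VER_BOXES : Int) (place : List (List Int)) (out : List (List Int) × List (List Int)) : Prop := out = move_tetrimino_alt board move_dir HOR_BOXES VER_BOXES place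
instance (board : List (List Int)) (move_dir : String) (HOR_BOXES : Int) (VER_BOXES : Int) (place : List (List Int)) (out : List (List Int) × List (List Int)) : Decidable (Spec_move_tetrimino board move_dir HOR_BOXES VER_BOXES place out) := by unfold Spec_move_tetrimino; infer_instance

-- ===== CLAIM (what is proved, stated in full; the proofs are below) =====
def Claim_equal_move_tetrimino : Prop := ∀ (board : List (List Int)) (move_dir : String) (HOR_BOXES : Int) (VER_BOXES : Int) (place : List (List Int)), Dom_move_tetrimino board move_dir HOR_BOXES VER_BOXES place → Pre_move_tetrimino board move_dir HOR_BOXES VER_BOXES place → Spec_move_tetrimino board move_dir HOR_BOXES VER_BOXES place (move_tetrimino board move_dir HOR_BOXES VER_BOXES place)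

-- ===== LEMMAS AND PROOFS =====
-- proof-only abbreviations for A's loop characterisation
def pvTarget (move_dir : String) (box : List Int) : List Int :=
  [(PySem.List.pyGet? box 0).getD 0 + (PySem.List.pyGet? (PySem.Dict.getD pvMOVES move_dir []) 1).getD 0,
   (PySem.List.pyGet? box 1).getD 0 + (PySem.List.pyGet? (PySem.Dict.getD pvMOVES move_dir []) 0).getD 0]

def pvOutOfBounds (HOR_BOXES VER_BOXES : Int) (p : List Int) : Bool :=
  !(decide (0 ≤ (PySem.List.pyGet? p 1).getD 0 ∧ (PySem.List.pyGet? p 1).getD 0 < HOR_BOXES) &&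
    decide (0 ≤ (PySem.List.pyGet? p 0).getD 0 ∧ (PySem.List.pyGet? p 0).getD 0 < VER_BOXES))

def pvStamp (nb : List (List Int)) (p : List Int) : List (List Int) :=
  pvSetCell nb ((PySem.List.pyGet? p 0).getD 0) ((PySem.List.pyGet? p 1).getD 0)

-- a grid described by a cell function, the shape of B's comprehension
def pvGridOf (V H : Int) (f : Int → Int → Int) : List (List Int) :=
  (PySem.List.pyRange 0 V 1).map (fun y => (PySem.List.pyRange 0 H 1).map (fun x => f y x))

theorem pvPairGet0 (a b : Int) : (PySem.List.pyGet? [a, b] 0).getD 0 = a := by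
  simp [PySem.List.pyGet?, PySem.List.pyIdx?]

theorem pvPairGet1 (a b : Int) : (PySem.List.pyGet? [a, b] 1).getD 0 = b := by
  simp [PySem.List.pyGet?, PySem.List.pyIdx?]

theorem pvLoopA_spec (board place0 : List (List Int)) (move_dir : String) (H V : Int) :
    ∀ (rest : List (List Int)) (nb np : List (List Int)),
      pvLoopA board place0 move_dir H V rest nb np =
        if (rest.map (pvTarget move_dir)).any (pvOutOfBounds H V) then (board, place0)
        else ((rest.map (pvTarget move_dir)).foldl pvStamp nb, np ++ rest.map (pvTarget move_dir)) := by
  intro rest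
  induction rest with
  | nil => intro nb np; simp [pvLoopA]
  | cons box rest ih =>
    intro nb np
    rw [pvLoopA]
    set x := (PySem.List.pyGet? box 1).getD 0 + (PySem.List.pyGet? (PySem.Dict.getD pvMOVES move_dir []) 0).getD 0 with hxdef
    set y := (PySem.List.pyGet? box 0).getD 0 + (PySem.List.pyGet? (PySem.Dict.getD pvMOVES move_dir []) 1).getD 0 with hydef
    have htgt : pvTarget move_dir box = [y, x] := rfl
    by_cases h : ¬(0 ≤ x ∧ x < H) ∨ ¬(0 ≤ y ∧ y < V)
    · rw [if_pos h]
      have hout : pvOutOfBounds H V (pvTarget move_dir box) = true := by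
        rw [htgt]; unfold pvOutOfBounds; rw [pvPairGet0, pvPairGet1]
        rcases h with h | h <;> simp [h]
      rw [List.map_cons, List.any_cons, hout]
      simp
    · rw [if_neg h]
      rcases not_or.mp h with ⟨h1, h2⟩
      have h1' := not_not.mp h1
      have h2' := not_not.mp h2
      have hout : pvOutOfBounds H V (pvTarget move_dir box) = false := by
        rw [htgt]; unfold pvOutOfBounds; rw [pvPairGet0, pvPairGet1]
        simp [h1'.1, h1'.2, h2'.1, h2'.2]
      have hst : pvStamp nb [y, x] = pvSetCell nb y x := by
        unfold pvStamp; rw [pvPairGet0, pvPairGet1]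
      rw [ih, List.map_cons, List.any_cons, hout, Bool.false_or, List.foldl_cons, htgt, hst]
      split <;> simp

-- the min/max extrema test over a nonempty Int list ↔ the pointwise bounds
theorem pvExtrema_iff (zs : List Int) (B : Int) (hne : zs ≠ []) :
    (0 ≤ (PySem.List.min? zs (fun v => v)).getD 0 ∧ (PySem.List.max? zs (fun v => v)).getD 0 < B) ↔
      ∀ v ∈ zs, 0 ≤ v ∧ v < B := by
  cases zs with
  | nil => exact absurd rfl hne
  | cons z t =>
    rw [PySem.List.min?_id_cons, PySem.List.max?_id_cons]
    simp only [Option.getD_some]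
    constructor
    · rintro ⟨h0, hB⟩ v hv
      exact ⟨le_trans h0 (PySem.List.min?_isMin (PySem.List.min?_id_cons z t) v hv),
             lt_of_le_of_lt (PySem.List.max?_isMax (PySem.List.max?_id_cons z t) v hv) hB⟩
    · intro h
      exact ⟨(h _ (PySem.List.min?_mem (PySem.List.min?_id_cons z t))).1,
             (h _ (PySem.List.max?_mem (PySem.List.max?_id_cons z t))).2⟩

-- A's per-element bounds check ↔ B's guard built from the extrema of the coordinate lists
theorem pvGuard_iff (np : List (List Int)) (H V : Int) :
    np.any (pvOutOfBounds H V) = true ↔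
      (np ≠ [] ∧
       ¬(0 ≤ (PySem.List.min? (np.map (fun p => (PySem.List.pyGet? p 1).getD 0)) (fun v => v)).getD 0 ∧
         (PySem.List.max? (np.map (fun p => (PySem.List.pyGet? p 1).getD 0)) (fun v => v)).getD 0 < H ∧
         0 ≤ (PySem.List.min? (np.map (fun p => (PySem.List.pyGet? p 0).getD 0)) (fun v => v)).getD 0 ∧
         (PySem.List.max? (np.map (fun p => (PySem.List.pyGet? p 0).getD 0)) (fun v => v)).getD 0 < V)) := by
  rcases eq_or_ne np [] with rfl | hne
  · simp
  · have hx := pvExtrema_iff (np.map (fun p => (PySem.List.pyGet? p 1).getD 0)) H (by simpa using hne)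
    have hy := pvExtrema_iff (np.map (fun p => (PySem.List.pyGet? p 0).getD 0)) V (by simpa using hne)
    constructor
    · intro hany
      refine ⟨hne, ?_⟩
      rintro ⟨ha, hb, hc, hd⟩
      obtain ⟨p, hp, hout⟩ := List.any_eq_true.mp hany
      have hxall := hx.mp ⟨ha, by tauto⟩
      have hyall := hy.mp ⟨hc, hd⟩
      have h1 := hxall _ (List.mem_map_of_mem hp)
      have h2 := hyall _ (List.mem_map_of_mem hp)
      unfold pvOutOfBounds at hout
      simp only [Bool.not_eq_eq_eq_not, Bool.not_true, Bool.and_eq_false_iff, decide_eq_false_iff_not] at hout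
      rcases hout with h | h
      · exact h ⟨h1.1, h1.2⟩
      · exact h ⟨h2.1, h2.2⟩
    · rintro ⟨-, hnot⟩
      by_contra hany
      have hall : ∀ p ∈ np, pvOutOfBounds H V p = false := by
        intro p hp
        by_contra hb
        exact hany (List.any_eq_true.mpr ⟨p, hp, by simpa using hb⟩)
      apply hnot
      have hxall : ∀ v ∈ np.map (fun p => (PySem.List.pyGet? p 1).getD 0), 0 ≤ v ∧ v < H := by
        intro v hv
        obtain ⟨p, hp, rfl⟩ := List.mem_map.mp hv
        have := hall p hp
        unfold pvOutOfBounds at this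
        simp only [Bool.not_eq_eq_eq_not, Bool.not_false, Bool.and_eq_true, decide_eq_true_eq] at this
        exact this.1
      have hyall : ∀ v ∈ np.map (fun p => (PySem.List.pyGet? p 0).getD 0), 0 ≤ v ∧ v < V := by
        intro v hv
        obtain ⟨p, hp, rfl⟩ := List.mem_map.mp hv
        have := hall p hp
        unfold pvOutOfBounds at this
        simp only [Bool.not_eq_eq_eq_not, Bool.not_false, Bool.and_eq_true, decide_eq_true_eq] at this
        exact this.2
      obtain ⟨ha, hb⟩ := hx.mpr hxall
      obtain ⟨hc, hd⟩ := hy.mpr hyall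
      exact ⟨ha, hb, hc, hd⟩

theorem pvGridOf_congr (V H : Int) (f g : Int → Int → Int)
    (h : ∀ y x, 0 ≤ y → y < V → 0 ≤ x → x < H → f y x = g y x) :
    pvGridOf V H f = pvGridOf V H g := by
  unfold pvGridOf
  apply List.map_congr_left
  intro y hy
  obtain ⟨hy0, hyV⟩ := (by simpa using PySem.List.mem_pyRange_one.mp hy : 0 ≤ y ∧ y < V)
  apply List.map_congr_left
  intro x hx
  obtain ⟨hx0, hxH⟩ := (by simpa using PySem.List.mem_pyRange_one.mp hx : 0 ≤ x ∧ x < H)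
  exact h y x hy0 hyV hx0 hxH

-- a single in-bounds stamp on a function-described grid
theorem pvSetCell_gridOf (V H : Int) (f : Int → Int → Int) (a b : Int)
    (ha0 : 0 ≤ a) (haV : a < V) (hb0 : 0 ≤ b) (hbH : b < H) :
    pvSetCell (pvGridOf V H f) a b = pvGridOf V H (fun y x => if y = a ∧ x = b then 1 else f y x) := by
  unfold pvSetCell pvGridOf
  apply List.ext_getElem
  · simp
  · intro i h1 h2
    simp only [List.length_modify, List.length_map] at h1
    rw [List.getElem_modify]
    have hyi : (PySem.List.pyRange 0 V 1)[i]'(by simpa using h1) = (i : Int) := by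
      rw [PySem.List.getElem_pyRange_one]; ring
    by_cases hia : a.toNat = i
    · rw [if_pos hia]
      rw [List.getElem_map, List.getElem_map, hyi]
      have hia' : (i : Int) = a := by omega
      apply List.ext_getElem
      · simp
      · intro j h3 h4
        simp only [List.length_set, List.length_map] at h3
        rw [List.getElem_set, List.getElem_map, List.getElem_map]
        have hxj : (PySem.List.pyRange 0 H 1)[j]'(by simpa using h3) = (j : Int) := by
          rw [PySem.List.getElem_pyRange_one]; ring
        rw [hxj]
        show (if b.toNat = j then (1 : Int) else f i j) = if (i : Int) = a ∧ (j : Int) = b then 1 else f i j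
        by_cases hjb : b.toNat = j
        · rw [if_pos hjb, if_pos ⟨hia', by omega⟩]
        · rw [if_neg hjb, if_neg (by rintro ⟨-, hxb⟩; omega)]
    · rw [if_neg hia]
      rw [List.getElem_map, List.getElem_map, hyi]
      apply List.map_congr_left
      intro x hx
      show f i x = if (i : Int) = a ∧ x = b then 1 else f i x
      rw [if_neg (by rintro ⟨hya, -⟩; omega)]

-- stamping a list of in-bounds cells on a function-described grid = marking them in the function
theorem pvFoldl_gridOf (V H : Int) (np : List (List Int)) :
    ∀ (f : Int → Int → Int),
      (∀ p ∈ np, 0 ≤ (PySem.List.pyGet? p 0).getD 0 ∧ (PySem.List.pyGet? p 0).getD 0 < V ∧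
                 0 ≤ (PySem.List.pyGet? p 1).getD 0 ∧ (PySem.List.pyGet? p 1).getD 0 < H) →
      np.foldl pvStamp (pvGridOf V H f) =
        pvGridOf V H (fun y x =>
          if (y, x) ∈ np.map (fun p => ((PySem.List.pyGet? p 0).getD 0, (PySem.List.pyGet? p 1).getD 0))
          then 1 else f y x) := by
  induction np with
  | nil => intro f _; simp [List.foldl_nil, pvGridOf]
  | cons p rest ih =>
    intro f hb
    obtain ⟨ha0, haV, hb0, hbH⟩ := hb p List.mem_cons_self
    rw [List.foldl_cons,
        show pvStamp (pvGridOf V H f) p =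
          pvSetCell (pvGridOf V H f) ((PySem.List.pyGet? p 0).getD 0) ((PySem.List.pyGet? p 1).getD 0) from rfl,
        pvSetCell_gridOf V H f _ _ ha0 haV hb0 hbH,
        ih _ (fun u hu => hb u (List.mem_cons_of_mem _ hu))]
    apply pvGridOf_congr
    intro y x _ _ _ _
    rw [List.map_cons]
    by_cases hr : (y, x) ∈ rest.map (fun p => ((PySem.List.pyGet? p 0).getD 0, (PySem.List.pyGet? p 1).getD 0))
    · rw [if_pos hr, if_pos (List.mem_cons_of_mem _ hr)]
    · rw [if_neg hr]
      by_cases ht : y = (PySem.List.pyGet? p 0).getD 0 ∧ x = (PySem.List.pyGet? p 1).getD 0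
      · rw [if_pos ht, if_pos (by rw [List.mem_cons]; left; rw [ht.1, ht.2])]
      · rw [if_neg ht,
            if_neg (by
              rw [List.mem_cons]
              rintro (hc | hc)
              · exact ht ⟨congrArg Prod.fst hc, congrArg Prod.snd hc⟩
              · exact hr hc)]

-- the fresh board is the all-zero function-described grid
theorem pvCreateBoard_eq (H V : Int) : pvCreateBoard H V = pvGridOf V H (fun _ _ => 0) := by
  unfold pvCreateBoard pvGridOf
  apply List.ext_getElem
  · simp
  · intro i h1 h2
    rw [List.getElem_map, List.getElem_map]
    apply List.ext_getElem
    · simp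
    · intro j h3 h4
      simp

-- ===== VERDICT (by name: the statement is the Claim_ definition above) =====
theorem move_tetrimino_spec : Claim_equal_move_tetrimino := by
  intro board move_dir H V place _ _
  unfold Spec_move_tetrimino move_tetrimino move_tetrimino_alt
  by_cases hn : move_dir == "none"
  · simp [hn]
  · simp only [hn, Bool.false_eq_true, if_false]
    rw [pvLoopA_spec]
    have hmap : place.map (fun b => [(PySem.List.pyGet? b 0).getD 0 + (PySem.List.pyGet? (PySem.Dict.getD pvMOVES move_dir []) 1).getD 0,
         (PySem.List.pyGet? b 1).getD 0 + (PySem.List.pyGet? (PySem.Dict.getD pvMOVES move_dir []) 0).getD 0]) =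
        place.map (pvTarget move_dir) := rfl
    rw [hmap]
    by_cases hany : (place.map (pvTarget move_dir)).any (pvOutOfBounds H V) = true
    · rw [if_pos hany, if_pos ((pvGuard_iff (place.map (pvTarget move_dir)) H V).mp hany)]
    · rw [if_neg hany, if_neg (fun hc => hany ((pvGuard_iff (place.map (pvTarget move_dir)) H V).mpr hc))]
      have hbnds : ∀ p ∈ place.map (pvTarget move_dir),
          0 ≤ (PySem.List.pyGet? p 0).getD 0 ∧ (PySem.List.pyGet? p 0).getD 0 < V ∧
          0 ≤ (PySem.List.pyGet? p 1).getD 0 ∧ (PySem.List.pyGet? p 1).getD 0 < H := by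
        intro p hp
        have hf : pvOutOfBounds H V p = false := by
          by_contra hb
          exact hany (List.any_eq_true.mpr ⟨p, hp, by simpa using hb⟩)
        unfold pvOutOfBounds at hf
        simp only [Bool.not_eq_eq_eq_not, Bool.not_false, Bool.and_eq_true, decide_eq_true_eq] at hf
        exact ⟨hf.2.1, hf.2.2, hf.1.1, hf.1.2⟩
      rw [pvCreateBoard_eq, pvFoldl_gridOf V H (place.map (pvTarget move_dir)) _ hbnds]
      refine Prod.ext ?_ (by simp)
      show pvGridOf V H _ = _
      unfold pvGridOf
      apply List.map_congr_left
      intro y _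
      apply List.map_congr_left
      intro x _
      simp only [PySem.Set.mem_ofList]
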